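-- pv_equiv track=rewrite | github.com/Haspeldor/process_distillation | code/data_processing.py | create_feature_indices
-- ===== SOURCE A (Python) =====
-- def create_feature_indices(event_pool, attribute_pools, numerical_attributes, n_gram):
--     num_events = len(sorted(event_pool))  # Sorted event pool
--     feature_indices = {}
--     # Allocate indices for events
--     index = num_events * n_gram
--     # Allocate indices for categorical attributes
--     for attribute_name, possible_values in sorted(attribute_pools.items()):
--         num_values = len(sorted(possible_values))
--         feature_indices[attribute_name] = list(range(index, index + num_values))
--         index += num_values
--     # Allocate indices for numerical attributes
--     for numerical_attr in sorted(numerical_attributes):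
--         feature_indices[numerical_attr] = [index]
--         index += 1
--     return feature_indices
-- ===== SOURCE B (Python) =====
-- def create_feature_indices(event_pool, attribute_pools, numerical_attributes, n_gram):
--     entries = [(name, len(values)) for name, values in sorted(attribute_pools.items())]
--     entries += [(name, 1) for name in sorted(numerical_attributes)]
--     counts = [count for _, count in entries]
--     base = len(event_pool) * n_gram
--
--     def offset(i):
--         # closed-form start of entry i: base plus the total width of all earlier entries
--         return base + sum(counts[:i])
--
--     return {name: list(range(offset(i), offset(i) + count))
--             for i, (name, count) in enumerate(entries)}
-- ===== Notes on version B (the rewrite author's own statement) =====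
-- stated objective: alternative
-- what changed: Removes A's sequential running-index state entirely: each entry's starting offset is computed independently by a closed-form expression (base + total width of the earlier entries, a fresh sum over a prefix slice), so the dict is built by a stateless per-entry map at quadratic cost instead of A's accumulating loop.
import Mathlib
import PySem

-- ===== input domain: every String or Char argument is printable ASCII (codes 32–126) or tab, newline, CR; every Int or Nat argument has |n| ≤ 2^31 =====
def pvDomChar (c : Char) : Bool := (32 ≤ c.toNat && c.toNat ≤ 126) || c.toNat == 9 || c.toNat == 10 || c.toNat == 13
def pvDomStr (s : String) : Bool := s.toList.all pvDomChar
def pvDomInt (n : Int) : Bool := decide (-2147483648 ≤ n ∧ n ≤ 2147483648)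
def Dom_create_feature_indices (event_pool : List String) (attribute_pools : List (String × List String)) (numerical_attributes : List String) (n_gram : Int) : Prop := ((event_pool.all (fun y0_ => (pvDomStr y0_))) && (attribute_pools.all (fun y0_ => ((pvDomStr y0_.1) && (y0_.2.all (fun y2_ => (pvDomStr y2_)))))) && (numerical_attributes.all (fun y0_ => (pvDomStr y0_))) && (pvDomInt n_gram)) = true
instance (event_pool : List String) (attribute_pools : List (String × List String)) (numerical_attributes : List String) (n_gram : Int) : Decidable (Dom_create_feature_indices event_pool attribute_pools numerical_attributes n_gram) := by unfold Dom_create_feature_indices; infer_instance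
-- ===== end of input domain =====

-- B drops A's running-index state: every entry's offset is an independent closed-form prefix sum
-- (objective: alternative; B is quadratic, not faster).  sorted(attribute_pools.items()) is ported as a
-- sort by key name: attribute_pools is a Python dict, so its keys are unique and the tuple comparison
-- never reaches the second component.

-- ===== PORT A =====
def create_feature_indices (event_pool : List String) (attribute_pools : List (String × List String)) (numerical_attributes : List String) (n_gram : Int) : List (String × List Int) :=
  let num_events : Int := (PySem.List.sorted event_pool (fun s => s) false).length
  -- index starts at num_events * n_gram; categorical loop
  let st1 := (PySem.List.sorted attribute_pools (fun p => p.1) false).foldl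
    (fun (st : PySem.Dict String (List Int) × Int) p =>
      let num_values : Int := (PySem.List.sorted p.2 (fun s => s) false).length
      (st.1.insert p.1 (PySem.List.pyRange st.2 (st.2 + num_values) 1), st.2 + num_values))
    (PySem.Dict.empty, num_events * n_gram)
  -- numerical loop
  let st2 := (PySem.List.sorted numerical_attributes (fun s => s) false).foldl
    (fun (st : PySem.Dict String (List Int) × Int) a => (st.1.insert a [st.2], st.2 + 1)) st1
  st2.1.items

-- ===== PORT B =====
def create_feature_indices_alt (event_pool : List String) (attribute_pools : List (String × List String)) (numerical_attributes : List String) (n_gram : Int) : List (String × List Int) :=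
  let entries : List (String × Int) :=
    (PySem.List.sorted attribute_pools (fun p => p.1) false).map (fun p => (p.1, (p.2.length : Int)))
    ++ (PySem.List.sorted numerical_attributes (fun s => s) false).map (fun s => (s, (1 : Int)))
  let base : Int := (event_pool.length : Int) * n_gram
  let counts : List Int := entries.map (fun e => e.2)
  -- offset(i) = base + sum(counts[:i])
  let offset : Int → Int := fun i => base + (PySem.List.slice counts none (some i)).sum
  ((PySem.List.enumerate entries 0).foldl
    (fun (d : PySem.Dict String (List Int)) p =>
      d.insert p.2.1 (PySem.List.pyRange (offset p.1) (offset p.1 + p.2.2) 1)) PySem.Dict.empty).items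

-- ===== PRECONDITION & SPEC =====
def Spec_create_feature_indices (event_pool : List String) (attribute_pools : List (String × List String)) (numerical_attributes : List String) (n_gram : Int) (out : List (String × List Int)) : Prop := out = create_feature_indices_alt event_pool attribute_pools numerical_attributes n_gram
instance (event_pool : List String) (attribute_pools : List (String × List String)) (numerical_attributes : List String) (n_gram : Int) (out : List (String × List Int)) : Decidable (Spec_create_feature_indices event_pool attribute_pools numerical_attributes n_gram out) := by unfold Spec_create_feature_indices; infer_instance

-- ===== CLAIM =====
def Claim_equal_create_feature_indices : Prop := ∀ (event_pool : List String) (attribute_pools : List (String × List String)) (numerical_attributes : List String) (n_gram : Int), Dom_create_feature_indices event_pool attribute_pools numerical_attributes n_gram → Spec_create_feature_indices event_pool attribute_pools numerical_attributes n_gram (create_feature_indices event_pool attribute_pools numerical_attributes n_gram)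

-- ===== LEMMAS AND PROOFS =====

-- the uniform step both of A's loops amount to
def pvStep (st : PySem.Dict String (List Int) × Int) (e : String × Int) : PySem.Dict String (List Int) × Int :=
  (st.1.insert e.1 (PySem.List.pyRange st.2 (st.2 + e.2) 1), st.2 + e.2)

-- a prefix slice at a natural index is List.take of the prefix
theorem pv_slice_prefix {α : Type} (pre rest : List α) :
    PySem.List.slice (pre ++ rest) none (some (pre.length : Int)) = pre := by
  rw [PySem.List.slice_to_natCast]
  simp

-- A's running-index fold over a suffix = B's enumerate fold with per-entry prefix sums,
-- generalized over the already-consumed prefix 'pre'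
theorem pv_fold_enum (base : Int) :
    ∀ (es pre : List (String × Int)) (d : PySem.Dict String (List Int)),
    (es.foldl pvStep (d, base + ((pre.map (·.2)).sum))).1
    = (PySem.List.enumerate es (pre.length : Int)).foldl
        (fun d p =>
          d.insert p.2.1 (PySem.List.pyRange
            (base + (PySem.List.slice ((pre ++ es).map (fun e => e.2)) none (some p.1)).sum)
            (base + (PySem.List.slice ((pre ++ es).map (fun e => e.2)) none (some p.1)).sum + p.2.2) 1)) d := by
  intro es
  induction es with
  | nil => intro pre d; simp [PySem.List.enumerate]
  | cons e es ih =>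
      intro pre d
      rw [PySem.List.enumerate_cons, List.foldl_cons, List.foldl_cons]
      have hsl : PySem.List.slice ((pre ++ e :: es).map (fun e => e.2)) none (some (pre.length : Int))
          = pre.map (fun e => e.2) := by
        have := pv_slice_prefix (pre.map (fun e : String × Int => e.2)) ((e :: es).map (fun e => e.2))
        simpa using this
      rw [hsl]
      have hsum : base + (pre.map (·.2)).sum + e.2 = base + (((pre ++ [e]).map (·.2)).sum) := by
        simp; ring
      have hlen : ((pre.length : Int) + 1) = (((pre ++ [e]).length : Nat) : Int) := by
        simp
      have happ : pre ++ e :: es = (pre ++ [e]) ++ es := by simp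
      calc (es.foldl pvStep (d.insert e.1 (PySem.List.pyRange (base + (pre.map (·.2)).sum) (base + (pre.map (·.2)).sum + e.2) 1), base + (pre.map (·.2)).sum + e.2)).1
          = (es.foldl pvStep (d.insert e.1 (PySem.List.pyRange (base + (pre.map (·.2)).sum) (base + (pre.map (·.2)).sum + e.2) 1), base + (((pre ++ [e]).map (·.2)).sum))).1 := by rw [hsum]
        _ = _ := by
              rw [ih (pre ++ [e])]
              rw [hlen]
              simp only [← happ]

theorem create_feature_indices_spec : Claim_equal_create_feature_indices := by
  intro event_pool attribute_pools numerical_attributes n_gram _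
  unfold Spec_create_feature_indices create_feature_indices create_feature_indices_alt
  simp only [PySem.List.length_sorted]
  -- A's categorical loop is pvStep over (name, len) pairs
  have h1 : ∀ (init : PySem.Dict String (List Int) × Int),
      (PySem.List.sorted attribute_pools (fun p => p.1) false).foldl
        (fun (st : PySem.Dict String (List Int) × Int) p =>
          (st.1.insert p.1 (PySem.List.pyRange st.2 (st.2 + (p.2.length : Int)) 1),
           st.2 + (p.2.length : Int))) init
      = ((PySem.List.sorted attribute_pools (fun p => p.1) false).map
          (fun p => (p.1, (p.2.length : Int)))).foldl pvStep init := by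
    intro init; rw [List.foldl_map]; rfl
  -- A's numerical loop is pvStep over (name, 1) pairs
  have h2 : ∀ (init : PySem.Dict String (List Int) × Int),
      (PySem.List.sorted numerical_attributes (fun s => s) false).foldl
        (fun (st : PySem.Dict String (List Int) × Int) a => (st.1.insert a [st.2], st.2 + 1)) init
      = ((PySem.List.sorted numerical_attributes (fun s => s) false).map
          (fun s => (s, (1 : Int)))).foldl pvStep init := by
    intro init; rw [List.foldl_map]
    simp only [pvStep, PySem.List.pyRange_one_singleton]
  rw [h1, h2, ← List.foldl_append]
  have := pv_fold_enum ((event_pool.length : Int) * n_gram)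
    ((PySem.List.sorted attribute_pools (fun p => p.1) false).map (fun p => (p.1, (p.2.length : Int)))
      ++ (PySem.List.sorted numerical_attributes (fun s => s) false).map (fun s => (s, (1 : Int)))) [] PySem.Dict.empty
  exact congrArg PySem.Dict.items (by simpa using this)
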